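-- pv_equiv track=rewrite | github.com/lucabaz98/FilmReviewsScraper | scraper.py | create_ordered_box_office
-- ===== SOURCE A (Python) =====
-- def create_ordered_box_office(n):
--     first_half = list(range(n // 2))
--     second_half = list(range(n // 2, n))
--     interleaved_list = []
--     for i in range(n // 2):
--         interleaved_list.append(first_half[i])
--         interleaved_list.append(second_half[i])
--     return interleaved_list
-- ===== SOURCE B (Python) =====
-- def create_ordered_box_office(n):
--     h = n // 2
--     return [k // 2 + (k % 2) * h for k in range(2 * h)]
-- ===== Notes on version B (the rewrite author's own statement) =====
-- stated objective: simpler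
-- what changed: B replaces the two half-lists and the alternating-append loop by a single comprehension over output positions, computing each entry arithmetically from its index (k//2, plus n//2 on odd positions).
import Mathlib
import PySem

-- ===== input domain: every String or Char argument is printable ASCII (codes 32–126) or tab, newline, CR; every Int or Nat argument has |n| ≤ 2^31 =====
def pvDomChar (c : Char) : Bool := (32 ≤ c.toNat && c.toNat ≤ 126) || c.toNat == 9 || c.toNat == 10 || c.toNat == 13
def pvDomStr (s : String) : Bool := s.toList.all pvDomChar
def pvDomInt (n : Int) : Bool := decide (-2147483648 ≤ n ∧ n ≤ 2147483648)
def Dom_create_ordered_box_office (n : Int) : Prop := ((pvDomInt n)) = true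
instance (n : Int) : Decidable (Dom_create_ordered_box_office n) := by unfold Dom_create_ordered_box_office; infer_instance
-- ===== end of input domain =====

-- B builds the result in one comprehension over output positions, computing each entry
-- from its index instead of interleaving two half-lists (objective: simpler).

-- ===== PORT A =====
-- Indexing first_half[i] / second_half[i] is always in range (0 ≤ i < n//2 and both
-- halves have at least n//2 elements), so pyGetD is exact here.
def create_ordered_box_office (n : Int) : List Int :=
  let first_half := PySem.List.pyRange 0 (PySem.Int.floordiv n 2) 1
  let second_half := PySem.List.pyRange (PySem.Int.floordiv n 2) n 1
  (PySem.List.pyRange 0 (PySem.Int.floordiv n 2) 1).foldl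
    (fun acc i =>
      (acc ++ [PySem.List.pyGetD first_half i 0]) ++ [PySem.List.pyGetD second_half i 0]) []

-- ===== PORT B =====
def create_ordered_box_office_alt (n : Int) : List Int :=
  let h := PySem.Int.floordiv n 2
  (PySem.List.pyRange 0 (2 * h) 1).map
    (fun k => PySem.Int.floordiv k 2 + PySem.Int.mod k 2 * h)

-- ===== PRECONDITION & SPEC =====
def Spec_create_ordered_box_office (n : Int) (out : List Int) : Prop := out = create_ordered_box_office_alt n
instance (n : Int) (out : List Int) : Decidable (Spec_create_ordered_box_office n out) := by unfold Spec_create_ordered_box_office; infer_instance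

-- ===== CLAIM (what is proved, stated in full; the proofs are below) =====
def Claim_equal_create_ordered_box_office : Prop := ∀ (n : Int), Dom_create_ordered_box_office n → Spec_create_ordered_box_office n (create_ordered_box_office n)

-- ===== LEMMAS AND PROOFS =====

-- 2 * (n // 2) ≤ n
lemma two_floordiv_le (n : Int) : 2 * PySem.Int.floordiv n 2 ≤ n := by
  have h := PySem.Int.floordiv_mul_add_mod n 2
  have h2 := PySem.Int.mod_two_eq n
  omega

-- the loop invariant: after m iterations A's accumulator equals B's first 2m entries
lemma loop_eq (n : Int) (m : Nat) (hm : (m : Int) ≤ PySem.Int.floordiv n 2) :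
    (PySem.List.pyRange 0 (m : Int) 1).foldl
      (fun acc i =>
        (acc ++ [PySem.List.pyGetD (PySem.List.pyRange 0 (PySem.Int.floordiv n 2) 1) i 0]) ++
          [PySem.List.pyGetD (PySem.List.pyRange (PySem.Int.floordiv n 2) n 1) i 0]) []
    = (PySem.List.pyRange 0 (2 * (m : Int)) 1).map
        (fun k => PySem.Int.floordiv k 2 + PySem.Int.mod k 2 * PySem.Int.floordiv n 2) := by
  induction m with
  | zero => simp [PySem.List.pyRange_one_eq_nil]
  | succ m ih =>
    set h := PySem.Int.floordiv n 2 with hh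
    have hm' : (m : Int) ≤ h := by push_cast at hm ⊢; omega
    have h2h : 2 * h ≤ n := two_floordiv_le n
    -- left side: split off the last iteration
    have hcast : ((m + 1 : Nat) : Int) = (m : Int) + 1 := by push_cast; ring
    rw [hcast, PySem.List.pyRange_one_succ_right (a := 0) (b := (m : Int)) (by positivity)]
    rw [List.foldl_append, ih hm']
    -- the two indexed reads
    have hmlt : (m : Int) < h := by omega
    have hfh : PySem.List.pyGetD (PySem.List.pyRange 0 h 1) (m : Int) 0 = (m : Int) := by
      rw [PySem.List.pyGetD_eq_getElem _ 0 (by positivity)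
        (by rw [PySem.List.length_pyRange_one]; omega)]
      rw [PySem.List.getElem_pyRange_one]
      simp
    have hsh : PySem.List.pyGetD (PySem.List.pyRange h n 1) (m : Int) 0 = h + (m : Int) := by
      rw [PySem.List.pyGetD_eq_getElem _ 0 (by positivity)
        (by rw [PySem.List.length_pyRange_one]; omega)]
      rw [PySem.List.getElem_pyRange_one]
      simp
    -- right side: split off the last two positions
    have hc2 : 2 * ((m : Int) + 1) = (2 * (m : Int) + 1) + 1 := by ring
    rw [hc2, PySem.List.pyRange_one_succ_right (a := 0) (b := 2 * (m : Int) + 1) (by positivity),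
      PySem.List.pyRange_one_succ_right (a := 0) (b := 2 * (m : Int)) (by positivity)]
    simp only [List.map_append, List.map_cons, List.map_nil, List.append_assoc]
    simp [hfh, hsh]
    omega

-- ===== VERDICT (by name: the statement is the Claim_ definition above) =====
theorem create_ordered_box_office_spec : Claim_equal_create_ordered_box_office := by
  intro n _
  unfold Spec_create_ordered_box_office create_ordered_box_office create_ordered_box_office_alt
  simp only []
  set h := PySem.Int.floordiv n 2 with hh
  by_cases hpos : 0 ≤ h
  · have := loop_eq n h.toNat (by rw [← hh]; omega)
    rw [← hh] at this
    rwa [Int.toNat_of_nonneg hpos] at this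
  · rw [PySem.List.pyRange_one_eq_nil (a := 0) (b := h) (by omega),
      PySem.List.pyRange_one_eq_nil (a := 0) (b := 2 * h) (by omega)]
    simp
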